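-- pv_equiv track=rewrite | github.com/ThomasGit-Hub/Cryptography | debutfin.py | reverse_and_encrypt
-- ===== SOURCE A (Python) =====
-- def reverse_and_encrypt(message):
--     lsMessage = list(message)
--     ls_reverse = lsMessage[::-1]
--     result = []
--     for letter in range(len(lsMessage)):
--         result.append(lsMessage[letter])
--         result.append(ls_reverse[letter])
--     return result[:len(lsMessage)]
-- ===== SOURCE B (Python) =====
-- def reverse_and_encrypt(message):
--     src = list(message)
--     n = len(src)
--     result = []
--     for j in range(n):
--         if j % 2 == 0:
--             result.append(src[j // 2])
--         else:
--             result.append(src[n - 1 - (j - 1) // 2])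
--     return result
-- ===== Notes on version B (the rewrite author's own statement) =====
-- stated objective: simpler
-- what changed: B computes each of the n output positions directly by an index formula (src[j//2] for even j, src[n-1-(j-1)//2] for odd j) in one pass, instead of building the full 2n-element interleave of the message and its reverse and slicing it back to n.
import Mathlib
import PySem

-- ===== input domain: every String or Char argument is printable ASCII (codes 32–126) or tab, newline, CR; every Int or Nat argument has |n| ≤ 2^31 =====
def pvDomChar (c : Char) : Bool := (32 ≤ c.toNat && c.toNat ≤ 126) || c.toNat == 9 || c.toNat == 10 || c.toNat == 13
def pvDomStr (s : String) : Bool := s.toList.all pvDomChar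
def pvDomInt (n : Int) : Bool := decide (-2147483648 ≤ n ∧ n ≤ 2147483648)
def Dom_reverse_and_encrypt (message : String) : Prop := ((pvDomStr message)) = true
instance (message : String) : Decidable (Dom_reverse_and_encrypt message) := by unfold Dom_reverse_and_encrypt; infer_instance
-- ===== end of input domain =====

-- B computes each output position directly by an index formula instead of building the full 2n interleave and slicing it back to n (objective: simpler).

-- ===== PORT A =====
def reverse_and_encrypt (message : String) : List String :=
  let lsMessage : List String := message.toList.map (fun c => String.ofList [c])
  let ls_reverse : List String := (PySem.List.slice? lsMessage none none (-1)).getD []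
  let result : List String :=
    (PySem.List.pyRange 0 (lsMessage.length : Int) 1).foldl
      (fun acc letter =>
        (acc ++ [PySem.List.pyGetD lsMessage letter ""]) ++ [PySem.List.pyGetD ls_reverse letter ""]) []
  PySem.List.slice result none (some (lsMessage.length : Int))

-- ===== PORT B =====
def reverse_and_encrypt_alt (message : String) : List String :=
  let src : List String := message.toList.map (fun c => String.ofList [c])
  let n : Int := (src.length : Int)
  (PySem.List.pyRange 0 n 1).foldl
    (fun result j =>
      if PySem.Int.mod j 2 = 0 then
        result ++ [PySem.List.pyGetD src (PySem.Int.floordiv j 2) ""]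
      else
        result ++ [PySem.List.pyGetD src (n - 1 - PySem.Int.floordiv (j - 1) 2) ""]) []

-- ===== PRECONDITION & SPEC =====
def Spec_reverse_and_encrypt (message : String) (out : List String) : Prop := out = reverse_and_encrypt_alt message
instance (message : String) (out : List String) : Decidable (Spec_reverse_and_encrypt message out) := by unfold Spec_reverse_and_encrypt; infer_instance

-- ===== CLAIM (what is proved, stated in full; the proofs are below) =====
def Claim_equal_reverse_and_encrypt : Prop := ∀ (message : String), Dom_reverse_and_encrypt message → Spec_reverse_and_encrypt message (reverse_and_encrypt message)

-- ===== LEMMAS AND PROOFS =====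

-- length of the interleave of two indexed streams over range n
lemma pvLen {α : Type} (p q : ℕ → α) (n : ℕ) :
    ((List.range n).flatMap (fun k => [p k, q k])).length = 2 * n := by
  induction n with
  | zero => simp
  | succ m ih => rw [List.range_succ, List.flatMap_append, List.length_append, ih]; simp; omega

-- element j of the interleave: block j/2, side j%2
lemma pvGet {α : Type} (p q : ℕ → α) (n j : ℕ) (hj : j < 2 * n) :
    ((List.range n).flatMap (fun k => [p k, q k]))[j]? =
      some (if j % 2 = 0 then p (j / 2) else q (j / 2)) := by
  induction n with
  | zero => omega
  | succ m ih =>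
    rw [List.range_succ, List.flatMap_append]
    by_cases h : j < 2 * m
    · rw [List.getElem?_append_left (by rw [pvLen]; exact h)]
      exact ih h
    · rw [List.getElem?_append_right (by rw [pvLen]; omega)]
      rw [pvLen]
      have h1 : j = 2*m ∨ j = 2*m+1 := by omega
      rcases h1 with h1 | h1 <;> subst h1
      · simp
      · have e : 2*m+1 - 2*m = 1 := by omega
        have e2 : (2*m+1) % 2 = 1 := by omega
        have e3 : (2*m+1) / 2 = m := by omega
        simp [e, e2, e3]

lemma pvMain (message : String) : reverse_and_encrypt message = reverse_and_encrypt_alt message := by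
  simp only [reverse_and_encrypt, reverse_and_encrypt_alt,
    PySem.List.slice?_none_none_neg_one, Option.getD_some]
  set cs := message.toList.map (fun c => String.ofList [c]) with hcs
  set n := cs.length with hn
  -- normalize B's fold body to singleton-append form
  have hB : (fun (result : List String) (j : Int) =>
      if PySem.Int.mod j 2 = 0 then
        result ++ [PySem.List.pyGetD cs (PySem.Int.floordiv j 2) ""]
      else
        result ++ [PySem.List.pyGetD cs ((n : Int) - 1 - PySem.Int.floordiv (j - 1) 2) ""])
      = fun result j => result ++ [if PySem.Int.mod j 2 = 0 then
          PySem.List.pyGetD cs (PySem.Int.floordiv j 2) ""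
        else PySem.List.pyGetD cs ((n : Int) - 1 - PySem.Int.floordiv (j - 1) 2) ""] := by
    funext r j; split_ifs <;> rfl
  rw [hB, PySem.List.foldl_append_singleton_eq_map]
  simp only [List.append_assoc, List.singleton_append]
  rw [PySem.List.foldl_append_eq_flatMap
    (g := fun letter => [PySem.List.pyGetD cs letter "", PySem.List.pyGetD cs.reverse letter ""])]
  simp only [List.nil_append, PySem.List.pyRange_one, Int.sub_zero, Int.toNat_natCast,
    List.flatMap_map, List.map_map]
  rw [PySem.List.slice_to_natCast]
  simp only [zero_add]
  apply List.ext_getElem?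
  intro i
  by_cases hi : i < n
  · rw [List.getElem?_take_of_lt hi, pvGet _ _ _ _ (by omega),
      List.getElem?_map, List.getElem?_range hi]
    simp only [Option.map_some, Function.comp_apply]
    congr 1
    by_cases hpar : i % 2 = 0
    · have hm : PySem.Int.mod (i : Int) 2 = 0 := by
        simp only [PySem.Int.mod, Int.fmod_eq_emod]; omega
      have hd : PySem.Int.floordiv (i : Int) 2 = ((i / 2 : ℕ) : Int) := by
        simp only [PySem.Int.floordiv, Int.fdiv_eq_ediv]; omega
      rw [if_pos hpar, if_pos hm, hd, PySem.List.pyGetD_natCast]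
    · have hm : ¬ PySem.Int.mod (i : Int) 2 = 0 := by
        simp only [PySem.Int.mod, Int.fmod_eq_emod]; omega
      have hd : (n : Int) - 1 - PySem.Int.floordiv ((i : Int) - 1) 2
          = ((n - 1 - (i - 1) / 2 : ℕ) : Int) := by
        simp only [PySem.Int.floordiv, Int.fdiv_eq_ediv]; omega
      rw [if_neg hpar, if_neg hm, hd, PySem.List.pyGetD_natCast]
      have h2 : i / 2 < cs.reverse.length := by simp; omega
      rw [List.getD_eq_getElem _ _ h2, List.getElem_reverse]
      rw [PySem.List.pyGetD_natCast, List.getD_eq_getElem _ _ (by omega : n - 1 - (i-1)/2 < cs.length)]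
      congr 1
      omega
  · rw [List.getElem?_eq_none (by simp; omega), List.getElem?_eq_none (by simp; omega)]

-- ===== VERDICT (by name: the statement is the Claim_ definition above) =====
theorem reverse_and_encrypt_spec : Claim_equal_reverse_and_encrypt := by
  intro message _
  exact pvMain message
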